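-- pv_equiv track=rewrite | github.com/spetey/toy-agent | programs/hamming.py | syndrome_via_xor_rotate
-- ===== SOURCE A (Python) =====
-- def syndrome_via_xor_rotate(codeword):
--     """Compute syndrome using the XOR-of-rotated-copies approach.
--
--     This simulates what the fb2d gadget would do:
--     for each syndrome bit, XOR the relevant bit positions by
--     rotating the codeword to bring each target bit to position 0,
--     then XOR-accumulating.
--
--     Returns (s0, s1, s2, p_all_err)
--     """
--     # s0 checks Hamming positions {1,3,5,7} = codeword bits {1,3,5,7}
--     s0 = 0
--     for bit_pos in [1, 3, 5, 7]:
--         s0 ^= (codeword >> bit_pos) & 1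
--
--     # s1 checks Hamming positions {2,3,6,7} = codeword bits {2,3,6,7}
--     s1 = 0
--     for bit_pos in [2, 3, 6, 7]:
--         s1 ^= (codeword >> bit_pos) & 1
--
--     # s2 checks Hamming positions {4,5,6,7} = codeword bits {4,5,6,7}
--     s2 = 0
--     for bit_pos in [4, 5, 6, 7]:
--         s2 ^= (codeword >> bit_pos) & 1
--
--     # Overall parity
--     p_all_err = 0
--     for i in range(8):
--         p_all_err ^= (codeword >> i) & 1
--
--     return s0, s1, s2, p_all_err
-- ===== SOURCE B (Python) =====
-- def syndrome_via_xor_rotate(codeword):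
--     """Mask-and-popcount syndrome: only the low 8 bits matter, so take
--     parity of popcounts of the masked byte instead of four XOR loops."""
--     x = codeword & 0xFF
--
--     def parity(mask):
--         return bin(x & mask).count('1') & 1
--
--     return parity(0xAA), parity(0xCC), parity(0xF0), parity(0xFF)
-- ===== Notes on version B (the rewrite author's own statement) =====
-- stated objective: idiomatic
-- what changed: Replaces the four explicit XOR-accumulation loops over bit-position lists by bit masks (0xAA, 0xCC, 0xF0, 0xFF) on the low byte with popcount parity (bin(x & mask).count('1') & 1).
import Mathlib
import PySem

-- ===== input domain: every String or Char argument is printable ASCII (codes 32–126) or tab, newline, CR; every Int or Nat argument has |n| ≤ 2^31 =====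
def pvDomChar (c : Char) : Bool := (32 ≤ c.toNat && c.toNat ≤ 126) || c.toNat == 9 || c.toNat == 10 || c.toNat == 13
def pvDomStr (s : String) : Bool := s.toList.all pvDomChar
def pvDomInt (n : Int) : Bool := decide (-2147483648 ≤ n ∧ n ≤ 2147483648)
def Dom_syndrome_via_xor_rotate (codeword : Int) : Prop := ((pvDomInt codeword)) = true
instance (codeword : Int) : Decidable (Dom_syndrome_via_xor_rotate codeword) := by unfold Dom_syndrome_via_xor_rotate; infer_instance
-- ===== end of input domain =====

-- B replaces A's four XOR-accumulation loops by mask-and-popcount parity on the low byte (idiomatic).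


-- ===== PORT A =====
def syndrome_via_xor_rotate (codeword : Int) : Int × Int × Int × Int :=
  let s0 := [1, 3, 5, 7].foldl
    (fun s (bit_pos : Nat) => PySem.Int.bxor s (PySem.Int.band (codeword >>> bit_pos) 1)) 0
  let s1 := [2, 3, 6, 7].foldl
    (fun s (bit_pos : Nat) => PySem.Int.bxor s (PySem.Int.band (codeword >>> bit_pos) 1)) 0
  let s2 := [4, 5, 6, 7].foldl
    (fun s (bit_pos : Nat) => PySem.Int.bxor s (PySem.Int.band (codeword >>> bit_pos) 1)) 0
  let p_all_err := (List.range 8).foldl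
    (fun p (i : Nat) => PySem.Int.bxor p (PySem.Int.band (codeword >>> i) 1)) 0
  (s0, s1, s2, p_all_err)

-- ===== PORT B =====
-- bin(x & mask).count('1') & 1 : x & mask is nonnegative, so the '1'-count is bitCount
def pvParityMasked (x : Int) (mask : Int) : Int :=
  PySem.Int.band ((PySem.Int.bitCount (PySem.Int.band x mask) : Nat) : Int) 1

def syndrome_via_xor_rotate_alt (codeword : Int) : Int × Int × Int × Int :=
  let x := PySem.Int.band codeword 255
  (pvParityMasked x 170, pvParityMasked x 204, pvParityMasked x 240, pvParityMasked x 255)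

-- ===== PRECONDITION & SPEC =====
def Spec_syndrome_via_xor_rotate (codeword : Int) (out : Int × Int × Int × Int) : Prop := out = syndrome_via_xor_rotate_alt codeword
instance (codeword : Int) (out : Int × Int × Int × Int) : Decidable (Spec_syndrome_via_xor_rotate codeword out) := by unfold Spec_syndrome_via_xor_rotate; infer_instance

-- ===== CLAIM (what is proved, stated in full; the proofs are below) =====
def Claim_equal_syndrome_via_xor_rotate : Prop := ∀ (codeword : Int), Dom_syndrome_via_xor_rotate codeword → Spec_syndrome_via_xor_rotate codeword (syndrome_via_xor_rotate codeword)

-- ===== LEMMAS AND PROOFS =====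

-- a & 255 is floored reduction modulo 256, for every sign of a
theorem pv_and255 (m : Nat) : m &&& 255 = m % 256 := by
  simpa using Nat.and_two_pow_sub_one_eq_mod m 8

theorem pv_band255 (c : Int) : PySem.Int.band c 255 = c % 256 := by
  unfold PySem.Int.band
  split_ifs with h1 h2 h3
  · rw [show (255 : Int).toNat = 255 from rfl, pv_and255]
    omega
  · exact absurd (by norm_num) h2
  · rw [show (255 : Int).toNat = 255 from rfl, Nat.and_comm, pv_and255]
    omega
  · exact absurd (by norm_num) h3

-- bit k < 8 of c only depends on c % 256
theorem pv_bitred (c : Int) (k : Nat) (hk : k < 8) :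
    PySem.Int.band (c >>> k) 1 = PySem.Int.band ((c % 256) >>> k) 1 := by
  rw [PySem.Int.band_one, PySem.Int.band_one]
  simp only [PySem.Int.mod]
  rw [Int.fmod_eq_emod_of_nonneg _ (by norm_num : (0:Int) ≤ 2),
    Int.fmod_eq_emod_of_nonneg _ (by norm_num : (0:Int) ≤ 2),
    Int.shiftRight_eq_div_pow, Int.shiftRight_eq_div_pow]
  interval_cases k <;> omega

set_option maxHeartbeats 4000000 in
set_option maxRecDepth 100000 in
theorem pv_main : ∀ m : Fin 256,
    syndrome_via_xor_rotate (m.val : Int) = syndrome_via_xor_rotate_alt (m.val : Int) := by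
  decide

-- ===== VERDICT (by name: the statement is the Claim_ definition above) =====
theorem syndrome_via_xor_rotate_spec : Claim_equal_syndrome_via_xor_rotate := by
  intro c _
  unfold Spec_syndrome_via_xor_rotate
  have hr0 : 0 ≤ c % 256 := Int.emod_nonneg c (by norm_num)
  have hr1 : c % 256 < 256 := Int.emod_lt_of_pos c (by norm_num)
  have hcast : ((c % 256).toNat : Int) = c % 256 := Int.toNat_of_nonneg hr0
  have key := pv_main ⟨(c % 256).toNat, by omega⟩
  have hbit : ∀ k : Nat, k < 8 →
      PySem.Int.band (c >>> k) 1 = PySem.Int.band ((((c % 256).toNat : Nat) : Int) >>> k) 1 := by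
    intro k hk
    rw [pv_bitred c k hk, pv_bitred ((((c % 256).toNat : Nat) : Int)) k hk, hcast,
      show (c % 256) % 256 = c % 256 from by omega]
  have hA : syndrome_via_xor_rotate c = syndrome_via_xor_rotate (((c % 256).toNat : Nat) : Int) := by
    simp only [syndrome_via_xor_rotate,
      show List.range 8 = 0 :: 1 :: 2 :: 3 :: 4 :: 5 :: 6 :: 7 :: ([] : List Nat) from rfl, List.foldl_cons, List.foldl_nil]
    rw [hbit 0 (by norm_num), hbit 1 (by norm_num), hbit 2 (by norm_num), hbit 3 (by norm_num),
      hbit 4 (by norm_num), hbit 5 (by norm_num), hbit 6 (by norm_num), hbit 7 (by norm_num)]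
  have hB : syndrome_via_xor_rotate_alt c = syndrome_via_xor_rotate_alt (((c % 256).toNat : Nat) : Int) := by
    simp only [syndrome_via_xor_rotate_alt, pv_band255, hcast,
      show (c % 256) % 256 = c % 256 from by omega]
  rw [hA, hB]
  exact key
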